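-- pv_equiv track=rewrite | github.com/Dimoaon/JezykiSkryptowe | lab2/core/cleaner.py | iter_clean_chunks
-- ===== SOURCE A (Python) =====
-- def normalize_line(line):
--     # Ta funkcja upraszcza pojedynczy wiersz:
--     # usuwa biale znaki z poczatku i konca
--     # oraz zamienia wiele spacji na jedna.
--     result = ""
--     pending_space = False
--     i = 0
--
--     while i < len(line):
--         char = line[i]
--         if char in " \t\r\n":
--             # Zapamietujemy, ze pomiedzy slowami ma zostac jedna spacja.
--             if result:
--                 pending_space = True
--         else:
--             if pending_space:
--                 result += " "
--                 pending_space = False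
--             result += char
--         i += 1
--
--     return result
--
-- def iter_clean_chunks(input_stream):
--     # Czytamy plik linia po linii, zeby dzialac potokowo
--     # i nie trzymac calego tekstu naraz w pamieci.
--     buffer = ""
--     checked_lines = 0
--     empty_count = 0
--     content_started = False
--
--     for raw_line in input_stream:
--         cleaned_line = normalize_line(raw_line)
--
--         # Linia z piecioma myslnikami oznacza poczatek informacji o wydaniu.
--         # Wszystko dalej ignorujemy.
--         if cleaned_line == "-----":
--             break
--
--         if not content_started:
--             checked_lines += 1
--             buffer += cleaned_line + "\n"
--
--             # Dwie puste linie w pierwszych 10 wierszach oznaczaja koniec preambuly.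
--             if cleaned_line == "":
--                 empty_count += 1
--                 if empty_count == 2:
--                     buffer = ""
--                     content_started = True
--             else:
--                 empty_count = 0
--
--             if checked_lines == 10 and not content_started:
--                 # Jesli w pierwszych 10 liniach nie ma dwoch pustych wierszy,
--                 # uznajemy, ze preambuly nie bylo i wypisujemy bufor jako tresc.
--                 yield buffer
--                 buffer = ""
--                 content_started = True
--             continue
--
--         # Gdy tresc sie juz zaczela, zwracamy kolejne oczyszczone linie.
--         yield cleaned_line + "\n"
--
--     if not content_started and buffer:
--         yield buffer
-- ===== SOURCE B (Python) =====
-- def _norm(line):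
--     # collapse all runs of whitespace to single spaces, strip ends
--     return " ".join(line.split())
--
-- def iter_clean_chunks(input_stream):
--     it = iter(input_stream)
--     buf = []
--     empties = 0
--     # Phase 1: examine at most 10 lines to decide whether a preamble exists.
--     for _ in range(10):
--         try:
--             raw = next(it)
--         except StopIteration:
--             if buf:
--                 yield "".join(buf)
--             return
--         line = _norm(raw)
--         if line == "-----":
--             if buf:
--                 yield "".join(buf)
--             return
--         buf.append(line + "\n")
--         if line == "":
--             empties += 1
--             if empties == 2:
--                 break  # preamble found: discard buf, go to content
--         else:
--             empties = 0
--     else: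
--         # no double blank within 10 lines: the buffer IS content
--         yield "".join(buf)
--     # Phase 2: stream the remaining lines until the ----- marker.
--     for raw in it:
--         line = _norm(raw)
--         if line == "-----":
--             return
--         yield line + "\n"
-- ===== Notes on version B (the rewrite author's own statement) =====
-- stated objective: idiomatic
-- what changed: Single state-machine loop with content_started/checked_lines flags is split into two phases over one shared iterator (a bounded for/else preamble scan, then a plain streaming loop), and the hand-rolled per-character whitespace normalizer is replaced by ' '.join(line.split()).
import Mathlib
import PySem

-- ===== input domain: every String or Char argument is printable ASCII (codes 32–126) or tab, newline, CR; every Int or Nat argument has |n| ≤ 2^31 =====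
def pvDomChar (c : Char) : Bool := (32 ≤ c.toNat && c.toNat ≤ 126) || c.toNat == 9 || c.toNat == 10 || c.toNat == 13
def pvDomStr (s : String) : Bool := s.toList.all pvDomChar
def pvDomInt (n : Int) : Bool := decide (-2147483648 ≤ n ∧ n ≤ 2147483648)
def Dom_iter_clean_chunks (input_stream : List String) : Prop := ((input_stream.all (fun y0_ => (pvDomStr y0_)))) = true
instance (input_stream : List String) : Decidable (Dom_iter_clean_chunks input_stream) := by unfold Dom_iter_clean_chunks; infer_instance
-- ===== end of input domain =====

-- B replaces A's one-loop state machine by a two-phase split over one shared stream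
-- (bounded preamble scan, then plain streaming) and normalizes lines with " ".join(line.split()); objective: idiomatic (timing run measured a ~2x constant-factor speedup).

-- ===== PORT A =====

-- A's normalize_line: character loop with a pending_space flag (strings as List Char).
def normLoopA : List Char → List Char → Bool → List Char
  | [], result, _ => result
  | char :: rest, result, pending_space =>
    if char ∈ [' ', '\t', '\r', '\n'] then
      normLoopA rest result (if result ≠ [] then true else pending_space)
    else
      normLoopA rest ((if pending_space then result ++ [' '] else result) ++ [char]) false

def normalize_line (line : String) : String :=
  String.ofList (normLoopA line.toList [] false)

-- A's generator loop: state (buffer, checked_lines, empty_count, content_started), yields collected in `out`.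
def cleanLoopA : List String → String → Int → Int → Bool → List String → List String
  | [], buffer, _, _, content_started, out =>
      if content_started = false ∧ buffer ≠ "" then out ++ [buffer] else out
  | raw_line :: rest, buffer, checked_lines, empty_count, content_started, out =>
      let cleaned_line := normalize_line raw_line
      if cleaned_line = "-----" then
        if content_started = false ∧ buffer ≠ "" then out ++ [buffer] else out
      else if content_started = false then
        let checked_lines' := checked_lines + 1
        let buffer' := buffer ++ cleaned_line ++ "\n"
        let st :=
          if cleaned_line = "" then
            (if empty_count + 1 = 2 then ("", empty_count + 1, true) else (buffer', empty_count + 1, content_started))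
          else (buffer', (0 : Int), content_started)
        if checked_lines' = 10 ∧ st.2.2 = false then
          cleanLoopA rest "" checked_lines' st.2.1 true (out ++ [st.1])
        else
          cleanLoopA rest st.1 checked_lines' st.2.1 st.2.2 out
      else
        cleanLoopA rest buffer checked_lines empty_count content_started (out ++ [cleaned_line ++ "\n"])

def iter_clean_chunks (input_stream : List String) : List String :=
  cleanLoopA input_stream "" 0 0 false []

-- ===== PORT B =====

-- B's normalizer: " ".join(line.split())
def normAltB (line : String) : String :=
  PySem.Str.join " " (PySem.Str.split₀ line)

-- Phase 2: stream remaining lines until the ----- marker.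
def phase2B : List String → List String
  | [] => []
  | raw :: rest =>
    let line := normAltB raw
    if line = "-----" then [] else (line ++ "\n") :: phase2B rest

-- Phase 1: scan at most `fuel` (initially 10) lines; fuel 0 = loop fell through (for/else).
def phase1B : Nat → List String → List String → Int → List String
  | 0, it, buf, _ => PySem.Str.join "" buf :: phase2B it
  | _ + 1, [], buf, _ => if buf ≠ [] then [PySem.Str.join "" buf] else []
  | n + 1, raw :: rest, buf, empties =>
    let line := normAltB raw
    if line = "-----" then (if buf ≠ [] then [PySem.Str.join "" buf] else [])
    else
      let buf' := buf ++ [line ++ "\n"]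
      if line = "" then
        if empties + 1 = 2 then phase2B rest
        else phase1B n rest buf' (empties + 1)
      else phase1B n rest buf' 0

def iter_clean_chunks_alt (input_stream : List String) : List String :=
  phase1B 10 input_stream [] 0

-- ===== PRECONDITION & SPEC =====
def Spec_iter_clean_chunks (input_stream : List String) (out : List String) : Prop := out = iter_clean_chunks_alt input_stream
instance (input_stream : List String) (out : List String) : Decidable (Spec_iter_clean_chunks input_stream out) := by unfold Spec_iter_clean_chunks; infer_instance

-- ===== CLAIM (what is proved, stated in full; the proofs are below) =====
def Claim_equal_iter_clean_chunks : Prop := ∀ (input_stream : List String), Dom_iter_clean_chunks input_stream → Spec_iter_clean_chunks input_stream (iter_clean_chunks input_stream)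

-- ===== LEMMAS AND PROOFS =====

theorem join_snoc (l : List (List Char)) (w : List Char) :
    PySem.Chars.join [' '] (l ++ [w]) =
      PySem.Chars.join [' '] l ++ (if l = [] then [] else [' ']) ++ w := by
  induction l with
  | nil => simp [PySem.Chars.join_singleton, PySem.Chars.join_nil]
  | cons x xs ih =>
    cases xs with
    | nil => simp [PySem.Chars.join_cons_cons, PySem.Chars.join_singleton]
    | cons y ys =>
      simp only [List.cons_append, PySem.Chars.join_cons_cons] at *
      simp [ih]

theorem join_ne_nil (ws : List (List Char)) (h : ws ≠ []) (hw : ∀ w ∈ ws, w ≠ []) :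
    PySem.Chars.join [' '] ws ≠ [] := by
  cases ws with
  | nil => exact absurd rfl h
  | cons x xs =>
    cases xs with
    | nil => simpa [PySem.Chars.join_singleton] using hw x (by simp)
    | cons y ys =>
      rw [PySem.Chars.join_cons_cons]
      have := hw x (by simp)
      simp [this]

theorem char_eq_iff (a b : Char) : (a = b) ↔ a.toNat = b.toNat :=
  ⟨fun h => by rw [h], fun h => Char.ext (UInt32.toNat_inj.mp h)⟩

-- on Dom chars, Python str.split() whitespace coincides with A's " \t\r\n" set
theorem dom_isspace (c : Char) (h : pvDomChar c = true) :
    PySem.Chars.isspace c = decide (c ∈ [' ', '\t', '\r', '\n']) := by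
  simp only [pvDomChar, Bool.or_eq_true, Bool.and_eq_true, decide_eq_true_eq, beq_iff_eq] at h
  rw [Bool.eq_iff_iff]
  simp only [PySem.Chars.isspace, decide_eq_true_eq, Bool.or_eq_true, Bool.and_eq_true,
    List.mem_cons, List.not_mem_nil, or_false, char_eq_iff]
  have e1 : (' '.toNat) = 32 := rfl
  have e2 : ('\t'.toNat) = 9 := rfl
  have e3 : ('\r'.toNat) = 13 := rfl
  have e4 : ('\n'.toNat) = 10 := rfl
  rw [e1, e2, e3, e4]
  omega

-- A's normalize loop tracks split₀.go's (cur, acc) state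
theorem normLoop_go (cs : List Char) (hd : cs.all pvDomChar = true) :
    ∀ (cur : List Char) (acc : List (List Char)), (∀ w ∈ acc, w ≠ []) →
    normLoopA cs
      (PySem.Chars.join [' '] (acc.reverse ++ (if cur = [] then [] else [cur.reverse])))
      (decide (cur = []) && decide (acc ≠ []))
      = PySem.Chars.join [' '] (PySem.Chars.split₀.go cs cur acc) := by
  induction cs with
  | nil =>
    intro cur acc hw
    by_cases hc : cur = []
    · simp [normLoopA, PySem.Chars.split₀.go, hc]
    · simp [normLoopA, PySem.Chars.split₀.go, hc, List.isEmpty_iff]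
  | cons c rest ih =>
    intro cur acc hw
    simp only [List.all_cons, Bool.and_eq_true] at hd
    obtain ⟨hdc, hdr⟩ := hd
    rw [PySem.Chars.split₀.go]
    by_cases hc : c ∈ [' ', '\t', '\r', '\n']
    · -- whitespace char
      rw [normLoopA]
      rw [if_pos hc, dom_isspace c hdc, decide_eq_true hc]
      simp only [if_true]
      by_cases hcur : cur = []
      · subst hcur
        simp only [List.isEmpty_nil, if_true]
        by_cases ha : acc = []
        · subst ha
          have := ih hdr [] [] (by simp)
          simpa [PySem.Chars.join_nil] using this
        · have hne : PySem.Chars.join [' '] (acc.reverse ++ []) ≠ [] := by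
            rw [List.append_nil]
            exact join_ne_nil _ (by simpa using ha) (fun w hwm => hw w (List.mem_reverse.mp hwm))
          rw [if_pos hne]
          have := ih hdr [] acc hw
          simpa [ha] using this
      · rw [if_neg hcur]
        have hgo : (cur.isEmpty) = false := by simpa [List.isEmpty_iff] using hcur
        rw [hgo]
        simp only [Bool.false_eq_true, if_false]
        have hR : PySem.Chars.join [' '] (acc.reverse ++ [cur.reverse]) ≠ [] := by
          apply join_ne_nil _ (by simp)
          intro w hwm
          rcases List.mem_append.mp hwm with h1 | h1
          · exact hw w (List.mem_reverse.mp h1)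
          · simp only [List.mem_singleton] at h1; subst h1; simpa using hcur
        rw [if_pos hR]
        have hw' : ∀ w ∈ cur.reverse :: acc, w ≠ [] := by
          intro w hwm
          rcases List.mem_cons.mp hwm with h1 | h1
          · subst h1; simpa using hcur
          · exact hw w h1
        have := ih hdr [] (cur.reverse :: acc) hw'
        simpa [List.reverse_cons] using this
    · -- non-whitespace char
      rw [normLoopA]
      rw [if_neg hc, dom_isspace c hdc, decide_eq_false hc]
      simp only [Bool.false_eq_true, if_false]
      have := ih hdr (c :: cur) acc hw
      have hstate : ((if (decide (cur = []) && decide (acc ≠ [])) = true then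
            PySem.Chars.join [' '] (acc.reverse ++ (if cur = [] then [] else [cur.reverse])) ++ [' ']
          else PySem.Chars.join [' '] (acc.reverse ++ (if cur = [] then [] else [cur.reverse]))) ++ [c])
          = PySem.Chars.join [' '] (acc.reverse ++ [(c :: cur).reverse]) := by
        by_cases hcur : cur = []
        · subst hcur
          by_cases ha : acc = []
          · subst ha
            simp [PySem.Chars.join_nil, PySem.Chars.join_singleton]
          · simp only [decide_eq_true (by exact ha : acc ≠ []),
              if_true, List.append_nil, List.reverse_cons, List.reverse_nil, List.nil_append]
            rw [join_snoc]
            have : acc.reverse ≠ [] := by simpa using ha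
            simp [this, List.append_assoc]
        · have hP : (decide (cur = []) && decide (acc ≠ [])) = false := by simp [hcur]
          rw [hP]
          simp only [Bool.false_eq_true, if_false, if_neg hcur]
          rw [join_snoc, join_snoc]
          simp [List.append_assoc]
      rw [hstate]
      simpa using this

theorem norm_eq (s : String) (h : pvDomStr s = true) : normalize_line s = normAltB s := by
  apply String.toList_inj.mp
  have hgo := normLoop_go s.toList h [] [] (by simp)
  simp only [List.reverse_nil] at hgo
  unfold normalize_line normAltB
  rw [String.toList_ofList, PySem.Str.toList_join, PySem.Str.split₀_map_toList]
  have hsep : (" " : String).toList = [' '] := rfl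
  rw [hsep]
  simpa [PySem.Chars.split₀] using hgo

-- Chars.join with empty separator is flatten
theorem join_empty (l : List (List Char)) : PySem.Chars.join [] l = l.flatten := by
  induction l with
  | nil => simp [PySem.Chars.join_nil]
  | cons x xs ih =>
    cases xs with
    | nil => simp [PySem.Chars.join_singleton]
    | cons y ys => simp [PySem.Chars.join_cons_cons, ih]

theorem joinE_nil : PySem.Str.join "" ([] : List String) = "" := by
  apply String.toList_inj.mp
  simp [PySem.Str.toList_join, PySem.Chars.join_nil]

theorem joinE_snoc (buf : List String) (s : String) :
    PySem.Str.join "" (buf ++ [s]) = PySem.Str.join "" buf ++ s := by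
  apply String.toList_inj.mp
  simp [PySem.Str.toList_join, join_empty]

theorem joinE_ne (buf : List String) (s : String) :
    PySem.Str.join "" (buf ++ [s ++ "\n"]) ≠ "" := by
  intro h
  have := congrArg String.toList h
  simp [PySem.Str.toList_join, join_empty] at this

theorem phase2_eq (l : List String) (hd : l.all pvDomStr = true) :
    ∀ (buffer : String) (checked empties : Int) (out : List String),
    cleanLoopA l buffer checked empties true out = out ++ phase2B l := by
  induction l with
  | nil => intro buffer checked empties out; simp [cleanLoopA, phase2B]
  | cons raw rest ih =>
    intro buffer checked empties out
    simp only [List.all_cons, Bool.and_eq_true] at hd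
    obtain ⟨hdr, hdrest⟩ := hd
    rw [cleanLoopA, phase2B]
    simp only [norm_eq raw hdr]
    by_cases hm : normAltB raw = "-----"
    · simp [hm]
    · simp only [if_neg hm]
      have hgoal := ih hdrest buffer checked empties (out ++ [normAltB raw ++ "\n"])
      rw [hgoal, List.append_assoc]
      rfl

theorem phase1_eq (l : List String) (hd : l.all pvDomStr = true) :
    ∀ (n : Nat) (buf : List String) (empties : Int) (out : List String),
    1 ≤ n → n ≤ 10 → (buf ≠ [] → PySem.Str.join "" buf ≠ "") →
    cleanLoopA l (PySem.Str.join "" buf) (10 - (n : Int)) empties false out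
      = out ++ phase1B n l buf empties := by
  induction l with
  | nil =>
    intro n buf empties out h1 h10 hne
    obtain ⟨m, rfl⟩ := Nat.exists_eq_add_of_le h1
    rw [cleanLoopA]
    rw [show (1 + m) = (m + 1 : Nat) from by omega]
    rw [phase1B]
    by_cases hb : buf = []
    · subst hb; simp [joinE_nil]
    · have := hne hb
      simp [this, hb]
  | cons raw rest ih =>
    intro n buf empties out h1 h10 hne
    obtain ⟨m, rfl⟩ := Nat.exists_eq_add_of_le h1
    rw [cleanLoopA]
    rw [show (1 + m) = (m + 1 : Nat) from by omega, phase1B]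
    simp only [norm_eq raw (by simp_all : pvDomStr raw = true)]
    have hdrest : rest.all pvDomStr = true := by simp_all
    by_cases hm : normAltB raw = "-----"
    · -- break in both
      rw [if_pos hm, if_pos hm]
      by_cases hb : buf = []
      · subst hb; simp [joinE_nil]
      · have := hne hb
        simp [this, hb]
    · rw [if_neg hm, if_neg hm, if_pos trivial]
      have hsnoc : PySem.Str.join "" buf ++ normAltB raw ++ "\n"
          = PySem.Str.join "" (buf ++ [normAltB raw ++ "\n"]) := by
        rw [joinE_snoc, String.append_assoc]
      have hne' : (buf ++ [normAltB raw ++ "\n"]) ≠ [] → PySem.Str.join "" (buf ++ [normAltB raw ++ "\n"]) ≠ "" :=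
        fun _ => joinE_ne buf (normAltB raw)
      have harith : ((10 : Int) - (m + 1 : Nat)) + 1 = 10 - (m : Int) := by push_cast; ring
      by_cases he : normAltB raw = ""
      · by_cases h2 : empties + 1 = 2
        · -- double blank line: discard buffer, switch to content
          simp only [if_pos he, if_pos h2]
          rw [if_neg (by simp)]
          exact phase2_eq rest hdrest "" _ _ out
        · simp only [if_pos he, if_neg h2]
          rcases Nat.eq_zero_or_pos m with hm0 | hmpos
          · -- 10th line reached with no decision: flush buffer, switch to content
            subst hm0
            rw [if_pos (by constructor <;> first | (push_cast; ring) | trivial)]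
            rw [phase2_eq rest hdrest, phase1B]
            rw [hsnoc]
            simp [List.append_assoc]
          · rw [if_neg (by push_cast; intro hcontra; omega)]
            have := ih hdrest m (buf ++ [normAltB raw ++ "\n"]) (empties + 1) out hmpos (by omega) hne'
            rw [harith, hsnoc, this]
      · simp only [if_neg he]
        rcases Nat.eq_zero_or_pos m with hm0 | hmpos
        · subst hm0
          rw [if_pos (by constructor <;> first | (push_cast; ring) | trivial)]
          rw [phase2_eq rest hdrest, phase1B]
          rw [hsnoc]
          simp [List.append_assoc]
        · rw [if_neg (by push_cast; intro hcontra; omega)]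
          have := ih hdrest m (buf ++ [normAltB raw ++ "\n"]) 0 out hmpos (by omega) hne'
          rw [harith, hsnoc, this]

-- ===== VERDICT (by name: the statement is the Claim_ definition above) =====
theorem iter_clean_chunks_spec : Claim_equal_iter_clean_chunks := by
  intro s hd
  unfold Spec_iter_clean_chunks iter_clean_chunks iter_clean_chunks_alt
  have h := phase1_eq s hd 10 [] 0 [] (by norm_num) (by norm_num) (by intro h; exact absurd rfl h)
  simpa [joinE_nil] using h
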